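-- pv_equiv track=rewrite | github.com/magiclf-ai/agentic-ida-pro | src/entrypoints/reverse_expert.py | _resolve_available_name
-- ===== SOURCE A (Python) =====
-- from typing import Any, Dict, List, Optional, Tuple
--
-- def _resolve_available_name(requested: str, available: List[str]) -> str:
--     target = str(requested or "").strip()
--     if not target:
--         return ""
--     if target in available:
--         return target
--     for name in available:
--         if name.endswith(f"::{target}"):
--             return name
--     lowered = target.lower()
--     for name in available:
--         if str(name).lower() == lowered:
--             return name
--     return ""
-- ===== SOURCE B (Python) =====
-- def _resolve_available_name(requested, available):
--     target = str(requested or "").strip()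
--     if not target:
--         return ""
--     suffix = "::" + target
--     lowered = target.lower()
--
--     def tier(name):
--         if name == target:
--             return 0
--         if name.endswith(suffix):
--             return 1
--         if str(name).lower() == lowered:
--             return 2
--         return 3
--
--     best = min(enumerate(available), key=lambda p: (tier(p[1]), p[0]), default=None)
--     if best is not None and tier(best[1]) < 3:
--         return best[1]
--     return ""
-- ===== Notes on version B (the rewrite author's own statement) =====
-- stated objective: alternative
-- what changed: A's staged early-return scans (exact membership, then a suffix scan, then a case-insensitive scan) are replaced by scoring every name with a priority tier (0 exact, 1 '::'-suffix, 2 case-insensitive, 3 none) and selecting the argmin of (tier, index) with a single min-with-key pass; B also hoists the '::'+target suffix string out of the loop, which A's f-string rebuilds on every iteration.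
import Mathlib
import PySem

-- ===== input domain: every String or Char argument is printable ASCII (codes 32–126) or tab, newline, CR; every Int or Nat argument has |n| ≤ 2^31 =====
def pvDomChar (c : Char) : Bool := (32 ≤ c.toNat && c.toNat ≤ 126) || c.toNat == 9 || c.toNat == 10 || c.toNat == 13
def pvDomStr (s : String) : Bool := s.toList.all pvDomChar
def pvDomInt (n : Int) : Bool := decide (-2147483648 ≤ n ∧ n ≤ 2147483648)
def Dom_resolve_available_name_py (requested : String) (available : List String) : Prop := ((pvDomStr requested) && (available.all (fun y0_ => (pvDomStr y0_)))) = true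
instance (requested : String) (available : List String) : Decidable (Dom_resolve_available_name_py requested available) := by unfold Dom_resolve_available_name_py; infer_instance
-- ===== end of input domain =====

-- B replaces A's early-returning staged scans by scoring every name with a priority tier and
-- selecting the argmin of (tier, index) in one min-with-key pass; same return value (objective: alternative).

-- ===== PORT A =====
def resolve_available_name_py (requested : String) (available : List String) : String :=
  let target := PySem.Str.strip (if requested = "" then "" else requested)
  if target = "" then ""
  else if target ∈ available then target
  else
    match available.find? (fun name => PySem.Str.endswith name ("::" ++ target)) with
    | some name => name
    | none =>
      let lowered := PySem.Str.lower target
      match available.find? (fun name => PySem.Str.lower name == lowered) with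
      | some name => name
      | none => ""

-- ===== PORT B =====
-- priority tier of a name: 0 = exact, 1 = '::'-suffix match, 2 = case-insensitive match, 3 = no match
def pvTier (target suffix lowered : String) (name : String) : Nat :=
  if name = target then 0
  else if PySem.Str.endswith name suffix then 1
  else if PySem.Str.lower name == lowered then 2
  else 3

def resolve_available_name_py_alt (requested : String) (available : List String) : String :=
  let target := PySem.Str.strip (if requested = "" then "" else requested)
  if target = "" then ""
  else
    let suffix := "::" ++ target
    let lowered := PySem.Str.lower target
    match PySem.List.min2? (PySem.List.enumerate available)
        (fun p => pvTier target suffix lowered p.2) (fun p => p.1) with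
    | some best => if pvTier target suffix lowered best.2 < 3 then best.2 else ""
    | none => ""

-- ===== PRECONDITION & SPEC =====
def Spec_resolve_available_name_py (requested : String) (available : List String) (out : String) : Prop := out = resolve_available_name_py_alt requested available
instance (requested : String) (available : List String) (out : String) : Decidable (Spec_resolve_available_name_py requested available out) := by unfold Spec_resolve_available_name_py; infer_instance

-- ===== CLAIM (what is proved, stated in full; the proofs are below) =====
def Claim_equal_resolve_available_name_py : Prop := ∀ (requested : String) (available : List String), Dom_resolve_available_name_py requested available → Spec_resolve_available_name_py requested available (resolve_available_name_py requested available)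

-- ===== LEMMAS AND PROOFS =====

-- first element of minimal tier, as a plain running-argmin fold (indices dropped)
def pvBest (f : String → Nat) (m : String) (xs : List String) : String :=
  xs.foldl (fun m n => if f n < f m then n else m) m

-- the staged (find?-by-tier) reading both ports reduce to
def pvStaged (f : String → Nat) (xs : List String) : String :=
  match xs.find? (fun n => f n == 0) with
  | some n => n
  | none =>
    match xs.find? (fun n => f n == 1) with
    | some n => n
    | none =>
      match xs.find? (fun n => f n == 2) with
      | some n => n
      | none => ""

theorem find?_congr_mem {α : Type} (p q : α → Bool) (l : List α)
    (h : ∀ x ∈ l, p x = q x) : l.find? p = l.find? q := by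
  induction l with
  | nil => rfl
  | cons a l ih =>
    have ha := h a (by simp)
    simp only [List.find?, ha]
    cases q a
    · exact ih (fun x hx => h x (by simp [hx]))
    · rfl

theorem find?_beq_self_of_mem (t : String) (l : List String) :
    t ∈ l → l.find? (fun n => n == t) = some t := by
  induction l with
  | nil => intro h; cases h
  | cons a l ih =>
    intro h
    by_cases hat : a = t
    · simp [List.find?, hat]
    · have ht : t ∈ l := by
        rcases List.mem_cons.mp h with h' | h'
        · exact absurd h'.symm hat
        · exact h' 
      have hb : (a == t) = false := by simpa using hat
      simp [List.find?, hb, ih ht]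

-- min2? over a cons whose head index precedes all enumerated indices is the running argmin of the tier
theorem min2_fold_eq (f : String → Nat) (xs : List String) (s i : Int) (m : String) (h : i < s) :
    ∃ j : Int,
      PySem.List.min2? ((i, m) :: PySem.List.enumerate xs s)
        (fun p => f p.2) (fun p => p.1) = some (j, pvBest f m xs) := by
  induction xs generalizing s i m with
  | nil => exact ⟨i, rfl⟩
  | cons x xs ih =>
    rw [PySem.List.enumerate_cons]
    have hswap : PySem.List.min2? ((i, m) :: (s, x) :: PySem.List.enumerate xs (s + 1))
        (fun p : Int × String => f p.2) (fun p : Int × String => p.1)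
        = PySem.List.min2? ((if f x < f m then (s, x) else (i, m)) :: PySem.List.enumerate xs (s + 1))
        (fun p : Int × String => f p.2) (fun p : Int × String => p.1) := by
      simp only [PySem.List.min2?, List.foldl_cons]
      congr 1
      by_cases hf : f x < f m
      · have hcond : (decide (f x < f m) || !decide (f m < f x) && decide (s < i)) = true := by
          simp [hf]
        show (if (decide (f x < f m) || !decide (f m < f x) && decide (s < i)) = true
              then some (s, x) else some (i, m)) = _
        rw [hcond, if_pos rfl, if_pos hf]
      · have hcond : (decide (f x < f m) || !decide (f m < f x) && decide (s < i)) = false := by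
          have hsi : ¬ s < i := by omega
          simp [hf, hsi]
        show (if (decide (f x < f m) || !decide (f m < f x) && decide (s < i)) = true
              then some (s, x) else some (i, m)) = _
        rw [hcond]
        simp [hf]
    rw [hswap]
    by_cases hf : f x < f m
    · simp only [hf, if_true]
      obtain ⟨j, hj⟩ := ih (s + 1) s x (by omega)
      exact ⟨j, by simpa [pvBest, hf] using hj⟩
    · simp only [hf, if_false]
      obtain ⟨j, hj⟩ := ih (s + 1) i m (by omega)
      exact ⟨j, by simpa [pvBest, hf] using hj⟩

-- continuing the argmin fold from current best m yields the staged find?-by-tier result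
theorem best_staged (f : String → Nat) (xs : List String) (m : String) :
    (if f (pvBest f m xs) < 3 then pvBest f m xs else "") =
      (if f m = 0 then m
       else match xs.find? (fun n => f n == 0) with
       | some n => n
       | none =>
         if f m = 1 then m
         else match xs.find? (fun n => f n == 1) with
         | some n => n
         | none =>
           if f m = 2 then m
           else match xs.find? (fun n => f n == 2) with
           | some n => n
           | none => "") := by
  induction xs generalizing m with
  | nil =>
    simp only [pvBest, List.foldl_nil, List.find?_nil]
    split_ifs <;> (try rfl) <;> omega
  | cons x xs ih =>
    have hstep : pvBest f m (x :: xs) = pvBest f (if f x < f m then x else m) xs := rfl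
    have e0 : (x :: xs).find? (fun n => f n == 0)
        = if f x = 0 then some x else xs.find? (fun n => f n == 0) := by
      by_cases h : f x = 0
      · simp [List.find?, h]
      · have hb : (f x == 0) = false := by simpa using h
        simp [List.find?, hb, h]
    have e1 : (x :: xs).find? (fun n => f n == 1)
        = if f x = 1 then some x else xs.find? (fun n => f n == 1) := by
      by_cases h : f x = 1
      · simp [List.find?, h]
      · have hb : (f x == 1) = false := by simpa using h
        simp [List.find?, hb, h]
    have e2 : (x :: xs).find? (fun n => f n == 2)
        = if f x = 2 then some x else xs.find? (fun n => f n == 2) := by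
      by_cases h : f x = 2
      · simp [List.find?, h]
      · have hb : (f x == 2) = false := by simpa using h
        simp [List.find?, hb, h]
    rw [hstep, ih, e0, e1, e2]
    by_cases hlt : f x < f m <;> simp only [hlt, if_true, if_false] <;>
      by_cases h0m : f m = 0 <;> by_cases h0x : f x = 0 <;>
      by_cases h1m : f m = 1 <;> by_cases h1x : f x = 1 <;>
      by_cases h2m : f m = 2 <;> by_cases h2x : f x = 2 <;>
      simp only [h0m, h0x, h1m, h1x, h2m, h2x, if_true, if_false] <;>
      first
        | omega
        | rfl

-- port B computes the staged result
theorem alt_eq_staged (f : String → Nat) (xs : List String) :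
    (match PySem.List.min2? (PySem.List.enumerate xs)
        (fun p => f p.2) (fun p => p.1) with
      | some best => if f best.2 < 3 then best.2 else ""
      | none => "") = pvStaged f xs := by
  cases xs with
  | nil => rfl
  | cons x xs =>
    have h0 : PySem.List.enumerate (x :: xs) (0 : Int) = (0, x) :: PySem.List.enumerate xs 1 := by
      rw [PySem.List.enumerate_cons]; norm_num
    obtain ⟨j, hj⟩ := min2_fold_eq f xs 1 0 x (by omega)
    rw [h0, hj]
    show (if f (pvBest f x xs) < 3 then pvBest f x xs else "") = pvStaged f (x :: xs)
    simp only [best_staged f xs x, pvStaged]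
    have e0 : (x :: xs).find? (fun n => f n == 0)
        = if f x = 0 then some x else xs.find? (fun n => f n == 0) := by
      by_cases h : f x = 0
      · simp [List.find?, h]
      · have hb : (f x == 0) = false := by simpa using h
        simp [List.find?, hb, h]
    have e1 : (x :: xs).find? (fun n => f n == 1)
        = if f x = 1 then some x else xs.find? (fun n => f n == 1) := by
      by_cases h : f x = 1
      · simp [List.find?, h]
      · have hb : (f x == 1) = false := by simpa using h
        simp [List.find?, hb, h]
    have e2 : (x :: xs).find? (fun n => f n == 2)
        = if f x = 2 then some x else xs.find? (fun n => f n == 2) := by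
      by_cases h : f x = 2
      · simp [List.find?, h]
      · have hb : (f x == 2) = false := by simpa using h
        simp [List.find?, hb, h]
    rw [e0, e1, e2]
    by_cases h0x : f x = 0 <;> by_cases h1x : f x = 1 <;> by_cases h2x : f x = 2 <;>
      simp only [h0x, h1x, h2x, if_true, if_false] <;> first | omega | rfl

-- port A computes the staged result (tier 0 ↔ exact membership, etc.)
theorem a_eq_staged (target : String) (xs : List String) :
    (if target ∈ xs then target
     else
       match xs.find? (fun name => PySem.Str.endswith name ("::" ++ target)) with
       | some name => name
       | none =>
         match xs.find? (fun name => PySem.Str.lower name == PySem.Str.lower target) with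
         | some name => name
         | none => "") =
    pvStaged (pvTier target ("::" ++ target) (PySem.Str.lower target)) xs := by
  by_cases hmem : target ∈ xs
  · have h0 : xs.find? (fun n => pvTier target ("::" ++ target) (PySem.Str.lower target) n == 0)
        = some target := by
      rw [find?_congr_mem _ (fun n => n == target) xs
        (by
          intro n _
          by_cases hn : n = target
          · simp [pvTier, hn]
          · have h1 : pvTier target ("::" ++ target) (PySem.Str.lower target) n ≠ 0 := by
              simp only [pvTier, hn, if_false]
              split_ifs <;> simp
            simp [hn, h1])]
      exact find?_beq_self_of_mem target xs hmem
    simp [pvStaged, h0, hmem]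
  · have hne : ∀ n ∈ xs, n ≠ target := fun n hn h => hmem (h ▸ hn)
    have h0 : xs.find? (fun n => pvTier target ("::" ++ target) (PySem.Str.lower target) n == 0)
        = none := by
      rw [List.find?_eq_none]
      intro n hn
      have hn' := hne n hn
      simp only [pvTier, hn', if_false]
      split_ifs <;> simp
    have h1 : xs.find? (fun n => pvTier target ("::" ++ target) (PySem.Str.lower target) n == 1)
        = xs.find? (fun name => PySem.Str.endswith name ("::" ++ target)) := by
      apply find?_congr_mem
      intro n hn
      have hn' := hne n hn
      by_cases he : PySem.Chars.endswith n.toList (':' :: ':' :: target.toList) = true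
      · have ht : pvTier target ("::" ++ target) (PySem.Str.lower target) n = 1 := by
          simp [pvTier, hn', he]
        simp [ht, he]
      · have he2 : PySem.Chars.endswith n.toList (':' :: ':' :: target.toList) = false := by
          simpa using he
        by_cases hl : PySem.Str.lower n = PySem.Str.lower target
        · have ht : pvTier target ("::" ++ target) (PySem.Str.lower target) n = 2 := by
            simp [pvTier, hn', he2, hl]
          simp [ht, he2]
        · have ht : pvTier target ("::" ++ target) (PySem.Str.lower target) n = 3 := by
            simp [pvTier, hn', he2, hl]
          simp [ht, he2]
    simp only [pvStaged, h0, h1, hmem, if_false]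
    cases hfind : xs.find? (fun name => PySem.Str.endswith name ("::" ++ target)) with
    | some name => rfl
    | none =>
      have hnoend : ∀ n ∈ xs, PySem.Str.endswith n ("::" ++ target) = false := by
        intro n hn
        simpa using List.find?_eq_none.mp hfind n hn
      have h2 : xs.find? (fun n => pvTier target ("::" ++ target) (PySem.Str.lower target) n == 2)
          = xs.find? (fun name => PySem.Str.lower name == PySem.Str.lower target) := by
        apply find?_congr_mem
        intro n hn
        have hn' := hne n hn
        have he2 : PySem.Chars.endswith n.toList (':' :: ':' :: target.toList) = false := by
          simpa using hnoend n hn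
        by_cases hl : PySem.Str.lower n = PySem.Str.lower target
        · have ht : pvTier target ("::" ++ target) (PySem.Str.lower target) n = 2 := by
            simp [pvTier, hn', he2, hl]
          simp [ht, hl]
        · have ht : pvTier target ("::" ++ target) (PySem.Str.lower target) n = 3 := by
            simp [pvTier, hn', he2, hl]
          simp [ht, hl]
      rw [h2]

theorem resolve_eq (requested : String) (available : List String) :
    resolve_available_name_py requested available
      = resolve_available_name_py_alt requested available := by
  unfold resolve_available_name_py resolve_available_name_py_alt
  by_cases ht : PySem.Str.strip (if requested = "" then "" else requested) = ""
  · simp [ht]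
  · simp only [ht, if_false]
    rw [alt_eq_staged]
    exact a_eq_staged _ available

-- ===== VERDICT (by name: the statement is the Claim_ definition above) =====
theorem resolve_available_name_py_spec : Claim_equal_resolve_available_name_py := by
  intro requested available _
  unfold Spec_resolve_available_name_py
  exact resolve_eq requested available
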